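-- pv_equiv track=rewrite | github.com/ChangChuntao/FAST | fast/com/readNav.py | getEpochListInNavData
-- ===== SOURCE A (Python) =====
-- def getEpochListInNavData(navData):
--     epochList = []
--     for prn in navData:
--         for epoch in navData[prn]:
--             if epoch not in epochList:
--                 epochList.append(epoch)
--
--     epochList = sorted(epochList)
--     return epochList
-- ===== SOURCE B (Python) =====
-- def getEpochListInNavData(navData):
--     allEpochs = []
--     for prn in navData:
--         allEpochs.extend(navData[prn])
--     allEpochs.sort()
--     epochList = []
--     for epoch in allEpochs:
--         if not epochList or epochList[-1] != epoch:
--             epochList.append(epoch)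
--     return epochList
-- ===== Notes on version B (the rewrite author's own statement) =====
-- stated objective: faster
-- what changed: Instead of a quadratic membership-scan dedup followed by a sort, B flattens all epochs without dedup, sorts once, and removes the now-adjacent duplicates in a single linear pass.
import Mathlib
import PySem

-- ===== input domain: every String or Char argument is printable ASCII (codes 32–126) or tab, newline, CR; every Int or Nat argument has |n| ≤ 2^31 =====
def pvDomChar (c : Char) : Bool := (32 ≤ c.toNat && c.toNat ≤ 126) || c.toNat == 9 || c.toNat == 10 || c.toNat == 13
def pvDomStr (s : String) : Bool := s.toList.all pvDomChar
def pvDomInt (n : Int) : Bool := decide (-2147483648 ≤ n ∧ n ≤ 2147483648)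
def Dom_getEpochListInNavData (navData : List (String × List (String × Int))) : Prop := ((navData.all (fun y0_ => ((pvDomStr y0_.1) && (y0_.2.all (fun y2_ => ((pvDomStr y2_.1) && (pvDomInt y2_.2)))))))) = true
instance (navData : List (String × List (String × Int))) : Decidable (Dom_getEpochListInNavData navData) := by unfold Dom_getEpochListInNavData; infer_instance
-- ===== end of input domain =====

-- B replaces A's quadratic membership-scan dedup (then sort) by flatten, one sort, and a
-- linear adjacent-duplicate pass; the two dicts are modelled as assoc lists via PySem.Dict.

-- ===== PORT A =====
-- epochList = []; for prn in navData: for epoch in navData[prn]: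
--   if epoch not in epochList: epochList.append(epoch); return sorted(epochList)
def getEpochListInNavData (navData : List (String × List (String × Int))) : List String :=
  let d := PySem.Dict.ofList navData
  let epochList := d.keys.foldl (fun acc prn =>
      (PySem.Dict.ofList (d.getD prn [])).keys.foldl
        (fun acc2 epoch => if epoch ∈ acc2 then acc2 else acc2 ++ [epoch]) acc) []
  PySem.List.sorted epochList (fun x => x) false

-- ===== PORT B =====
-- allEpochs = []; for prn in navData: allEpochs.extend(navData[prn]); allEpochs.sort();
-- then one pass appending epoch only when epochList is empty or epochList[-1] != epoch
def getEpochListInNavData_alt (navData : List (String × List (String × Int))) : List String :=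
  let d := PySem.Dict.ofList navData
  let allEpochs := d.keys.foldl (fun acc prn =>
      acc ++ (PySem.Dict.ofList (d.getD prn [])).keys) []
  (PySem.List.sorted allEpochs (fun x => x) false).foldl
    (fun epochList epoch =>
      if epochList = [] ∨ epochList.getLast? ≠ some epoch then epochList ++ [epoch]
      else epochList) []

-- ===== PRECONDITION & SPEC =====
def Spec_getEpochListInNavData (navData : List (String × List (String × Int))) (out : List String) : Prop := out = getEpochListInNavData_alt navData
instance (navData : List (String × List (String × Int))) (out : List String) : Decidable (Spec_getEpochListInNavData navData out) := by unfold Spec_getEpochListInNavData; infer_instance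

-- ===== CLAIM (what is proved, stated in full; the proofs are below) =====
def Claim_equal_getEpochListInNavData : Prop := ∀ (navData : List (String × List (String × Int))), Dom_getEpochListInNavData navData → Spec_getEpochListInNavData navData (getEpochListInNavData navData)

-- ===== LEMMAS AND PROOFS =====

-- A's inner conditional append is exactly PySem.Set.add.
theorem pv_add_eq (acc : List String) (e : String) :
    (if e ∈ acc then acc else acc ++ [e]) = PySem.Set.add acc e := by
  simp [PySem.Set.add, PySem.Set.contains]

-- dedup-while-flattening equals flatten-then-dedup (as Set.ofList).
theorem pv_setFold (g : String → List String) (l : List String) (s : List String) :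
    l.foldl (fun acc x => PySem.Set.update acc (g x)) (PySem.Set.ofList s)
      = PySem.Set.ofList (l.foldl (fun acc x => acc ++ g x) s) := by
  induction l generalizing s with
  | nil => rfl
  | cons x l ih =>
      have h : PySem.Set.update (PySem.Set.ofList s) (g x) = PySem.Set.ofList (s ++ g x) := by
        simp [PySem.Set.ofList_eq_foldl, PySem.Set.update, List.foldl_append]
      simpa [List.foldl_cons, h] using ih (s ++ g x)

-- in a strictly increasing list every element is ≤ the last one
theorem pv_le_getLast {res : List String} {l : String}
    (hp : res.Pairwise (· < ·)) (hl : res.getLast? = some l) :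
    ∀ r ∈ res, r ≤ l := by
  induction res with
  | nil => simp
  | cons a t ih =>
      rcases List.pairwise_cons.mp hp with ⟨ha, ht⟩
      cases t with
      | nil =>
          simp at hl; subst hl; simp
      | cons b u =>
          have hl' : (b :: u).getLast? = some l := by
            simpa [List.getLast?_cons_cons] using hl
          intro r hr
          rcases List.mem_cons.mp hr with h1 | h2
          · subst h1
            have hlm : l ∈ b :: u := List.mem_of_getLast? hl'
            exact le_of_lt (ha l hlm)
          · exact ih ht hl' r h2

-- the adjacent-dedup fold on a sorted list: strictly increasing and same members
theorem pv_adjFold (ys : List String) :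
    ∀ res : List String, ys.Pairwise (· ≤ ·) → res.Pairwise (· < ·) →
      (∀ r ∈ res, ∀ y ∈ ys, r ≤ y) →
      ((ys.foldl (fun epochList epoch =>
          if epochList = [] ∨ epochList.getLast? ≠ some epoch then epochList ++ [epoch]
          else epochList) res).Pairwise (· < ·) ∧
        ∀ x, (x ∈ ys.foldl (fun epochList epoch =>
          if epochList = [] ∨ epochList.getLast? ≠ some epoch then epochList ++ [epoch]
          else epochList) res ↔ x ∈ res ∨ x ∈ ys)) := by
  induction ys with
  | nil => intro res _ hres _; exact ⟨hres, fun x => by simp⟩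
  | cons y t ih =>
      intro res hys hres hle
      rcases List.pairwise_cons.mp hys with ⟨hy, ht⟩
      by_cases hc : res = [] ∨ res.getLast? ≠ some y
      · -- append y
        have hres' : (res ++ [y]).Pairwise (· < ·) := by
          refine List.pairwise_append.mpr ⟨hres, by simp, ?_⟩
          intro r hr y2 hy2
          simp at hy2; rw [hy2]
          rcases hc with hnil | hne
          · subst hnil; simp at hr
          · have hne' : res ≠ [] := by
              intro h; subst h; simp at hr
            obtain ⟨l, hl⟩ : ∃ l, res.getLast? = some l := by
              cases hgl : res.getLast? with
              | none => exact absurd (List.getLast?_eq_none_iff.mp hgl) hne'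
              | some l => exact ⟨l, rfl⟩
            have hr_le_l := pv_le_getLast hres hl r hr
            have hl_le_y : l ≤ y := hle l (List.mem_of_getLast? hl) y (by simp)
            have hl_ne_y : l ≠ y := by
              intro h; exact hne (by rw [hl, h])
            exact lt_of_le_of_lt hr_le_l (lt_of_le_of_ne hl_le_y hl_ne_y)
        have hle' : ∀ r ∈ res ++ [y], ∀ z ∈ t, r ≤ z := by
          intro r hr z hz
          rcases List.mem_append.mp hr with h1 | h2
          · exact hle r h1 z (by simp [hz])
          · simp at h2; subst h2; exact hy z hz
        have := ih (res ++ [y]) ht hres' hle'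
        refine ⟨by simpa [hc] using this.1, ?_⟩
        intro x
        have h2 := this.2 x
        simp only [List.foldl_cons, if_pos hc]
        rw [h2]; simp [List.mem_append, or_assoc]
      · -- skip y: y is the last element of res
        simp only [not_or, not_not] at hc
        have hyres : y ∈ res := List.mem_of_getLast? hc.2
        have := ih res ht hres (fun r hr z hz => hle r hr z (by simp [hz]))
        refine ⟨by simpa [hc.1, hc.2] using this.1, ?_⟩
        intro x
        simp only [List.foldl_cons]
        rw [if_neg (by simp [hc.1, hc.2])]
        rw [this.2 x]
        constructor
        · rintro (h | h) <;> simp [h]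
        · rintro (h | h)
          · exact Or.inl h
          · rcases List.mem_cons.mp h with h1 | h2
            · subst h1; exact Or.inl hyres
            · exact Or.inr h2

-- sorted unique elements = adjacent-dedup of the sorted full list
theorem pv_main (xs : List String) :
    PySem.List.sorted (PySem.Set.ofList xs) (fun x => x) false
      = (PySem.List.sorted xs (fun x => x) false).foldl
          (fun epochList epoch =>
            if epochList = [] ∨ epochList.getLast? ≠ some epoch then epochList ++ [epoch]
            else epochList) [] := by
  have hsorted : (PySem.List.sorted xs (fun x => x) false).Pairwise (· ≤ ·) :=
    PySem.List.sorted_pairwise (xs := xs) (key := fun x : String => x)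
  obtain ⟨hpw, hmem⟩ := pv_adjFold (PySem.List.sorted xs (fun x => x) false) []
    hsorted (by simp) (by simp)
  apply PySem.List.sorted_eq_of_perm_of_pairwise_lt
  · refine (List.perm_ext_iff_of_nodup ?_ (PySem.Set.nodup_ofList xs)).mpr ?_
    · exact hpw.imp ne_of_lt
    · intro a
      rw [hmem a]
      simp [PySem.List.mem_sorted, PySem.Set.mem_ofList]
  · exact hpw

-- ===== VERDICT (by name: the statement is the Claim_ definition above) =====
theorem getEpochListInNavData_spec : Claim_equal_getEpochListInNavData := by
  intro navData _
  unfold Spec_getEpochListInNavData getEpochListInNavData getEpochListInNavData_alt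
  simp only []
  rw [show (fun (acc2 : List String) epoch => if epoch ∈ acc2 then acc2 else acc2 ++ [epoch])
        = fun acc2 epoch => PySem.Set.add acc2 epoch from
      funext fun a => funext fun e => pv_add_eq a e]
  have h := pv_setFold
    (fun prn => (PySem.Dict.ofList ((PySem.Dict.ofList navData).getD prn [])).keys)
    (PySem.Dict.ofList navData).keys []
  rw [show PySem.Set.ofList ([] : List String) = [] from rfl] at h
  rw [show (fun (acc : List String) prn =>
        ((PySem.Dict.ofList ((PySem.Dict.ofList navData).getD prn [])).keys).foldl
          (fun acc2 epoch => PySem.Set.add acc2 epoch) acc)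
      = fun acc prn => PySem.Set.update acc
          ((PySem.Dict.ofList ((PySem.Dict.ofList navData).getD prn [])).keys) from rfl]
  rw [h]
  exact pv_main _
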